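-- pv_equiv track=rewrite | github.com/bhabendra101/Speech_Understanding | Assinment_04.py | next_birthday
-- ===== SOURCE A (Python) =====
-- def next_birthday(date, birthdays):
--     '''
--     Find the next birthday after the given date.
--     '''
--     month, day = date
--
--     # Sort all birthday dates (month, day)
--     sorted_dates = sorted(birthdays.keys())
--
--     # First, look for a birthday later in the same year
--     for bday in sorted_dates:
--         if bday > (month, day):
--             return bday, birthdays[bday]
--
--     # If none found, wrap around to the first birthday next year
--     first_birthday = sorted_dates[0]
--     return first_birthday, birthdays[first_birthday]
-- ===== SOURCE B (Python) =====
-- def next_birthday(date, birthdays):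
--     '''
--     Find the next birthday after the given date.
--
--     Single linear selection pass instead of sort-then-scan: rank each
--     birthday by the composite key ((b <= date), b), so birthdays strictly
--     after the date come first (ordered among themselves), followed by the
--     wrapped-around ones (smallest first).
--     '''
--     keys = list(birthdays)
--     best = keys[0]
--     for b in keys:
--         if ((b <= date), b) < ((best <= date), best):
--             best = b
--     return best, birthdays[best]
-- ===== Notes on version B (the rewrite author's own statement) =====
-- stated objective: alternative
-- what changed: Replaced sort-then-scan-for-first-successor (plus wrap-around to the sorted head) by a single linear selection pass that minimizes the composite key ((b <= date), b), which ranks birthdays strictly after the date before wrapped-around ones and orders each group ascending.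
import Mathlib
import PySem

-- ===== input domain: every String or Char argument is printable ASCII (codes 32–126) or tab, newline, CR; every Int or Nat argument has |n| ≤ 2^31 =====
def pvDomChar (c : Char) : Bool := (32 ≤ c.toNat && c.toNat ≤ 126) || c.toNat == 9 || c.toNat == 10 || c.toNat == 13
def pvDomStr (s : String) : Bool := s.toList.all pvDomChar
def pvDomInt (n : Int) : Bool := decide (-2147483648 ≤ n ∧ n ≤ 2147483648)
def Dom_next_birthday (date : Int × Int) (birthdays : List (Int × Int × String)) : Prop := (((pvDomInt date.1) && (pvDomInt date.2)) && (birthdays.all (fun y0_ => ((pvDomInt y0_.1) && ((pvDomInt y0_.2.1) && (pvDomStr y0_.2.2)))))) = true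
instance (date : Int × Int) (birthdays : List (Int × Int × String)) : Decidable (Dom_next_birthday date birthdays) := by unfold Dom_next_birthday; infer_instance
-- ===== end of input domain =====

-- B replaces A's sort-then-scan (first birthday after the date, else sorted head) by one
-- linear selection pass minimizing the composite key ((b <= date), b): an alternative
-- algorithm of similar size (O(n) selection instead of sorting).


-- ===== PORT A =====
-- The dict parameter 'birthdays' arrives as its item list ((month, day), name) flattened to
-- (month, day, name); both ports first rebuild the Python dict ((month, day) ↦ name) from it.
def pvDictOf (birthdays : List (Int × Int × String)) : PySem.Dict (Int × Int) String :=
  birthdays.foldl (fun d p => d.insert (p.1, p.2.1) p.2.2) PySem.Dict.empty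

-- Python compares (month, day) tuples lexicographically: that is '<' on Lex (Int × Int).
-- the 'for bday in sorted_dates: if bday > (month, day): return …' loop: first element > date
def pvFindGt (date : Int × Int) : List (Int × Int) → Option (Int × Int)
  | [] => none
  | b :: rest => if toLex date < toLex b then some b else pvFindGt date rest

def next_birthday (date : Int × Int) (birthdays : List (Int × Int × String)) : (Int × Int) × String :=
  let d := pvDictOf birthdays
  let sorted_dates := PySem.List.sorted d.keys (fun b => toLex b) false
  match pvFindGt date sorted_dates with
  | some bday => (bday, d.getD bday "")
  | none =>
    -- sorted_dates[0]: IndexError on an empty dict — excluded by Pre_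
    let first_birthday := PySem.List.pyGetD sorted_dates 0 ((0 : Int), (0 : Int))
    (first_birthday, d.getD first_birthday "")

-- ===== PORT B =====
-- ((b <= date), b) < ((best <= date), best): lexicographic on (bool, tuple), False < True
def pvKeyLt (date b best : Int × Int) : Bool :=
  (!(decide (toLex b ≤ toLex date)) && decide (toLex best ≤ toLex date)) ||
  ((decide (toLex b ≤ toLex date) == decide (toLex best ≤ toLex date)) && decide (toLex b < toLex best))

def next_birthday_alt (date : Int × Int) (birthdays : List (Int × Int × String)) : (Int × Int) × String :=
  let d := pvDictOf birthdays
  let keys := d.keys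
  -- best = keys[0]: IndexError on an empty dict — excluded by Pre_
  let best := keys.foldl (fun best b => if pvKeyLt date b best then b else best)
                (PySem.List.pyGetD keys 0 ((0 : Int), (0 : Int)))
  (best, d.getD best "")

-- ===== PRECONDITION & SPEC =====
-- On an empty dict both A and B raise IndexError (A at sorted_dates[0], B at keys[0]); Pre_ excludes exactly that input.
def Pre_next_birthday (date : Int × Int) (birthdays : List (Int × Int × String)) : Prop := birthdays ≠ []
instance (date : Int × Int) (birthdays : List (Int × Int × String)) : Decidable (Pre_next_birthday date birthdays) := by unfold Pre_next_birthday; infer_instance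

def pvWitness_next_birthday : (Int × Int) × (List (Int × Int × String)) :=
  ((6, 15), [((3 : Int), (1 : Int), "alice"), ((9 : Int), (2 : Int), "bob")])

def Spec_next_birthday (date : Int × Int) (birthdays : List (Int × Int × String)) (out : (Int × Int) × String) : Prop := out = next_birthday_alt date birthdays
instance (date : Int × Int) (birthdays : List (Int × Int × String)) (out : (Int × Int) × String) : Decidable (Spec_next_birthday date birthdays out) := by unfold Spec_next_birthday; infer_instance

-- ===== CLAIM (what is proved, stated in full; the proofs are below) =====
def Claim_equal_next_birthday : Prop := ∀ (date : Int × Int) (birthdays : List (Int × Int × String)), Dom_next_birthday date birthdays → Pre_next_birthday date birthdays → Spec_next_birthday date birthdays (next_birthday date birthdays)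

-- ===== LEMMAS AND PROOFS =====

-- the composite key B minimizes: wrapped-around birthdays (b ≤ date) rank after the others,
-- each group ordered lexicographically
def pvKey (date b : Int × Int) : Lex (Nat × Lex (Int × Int)) :=
  toLex ((if toLex b ≤ toLex date then 1 else 0 : Nat), toLex b)

theorem pvKeyLt_iff (date b c : Int × Int) :
    pvKeyLt date b c = true ↔ pvKey date b < pvKey date c := by
  unfold pvKeyLt pvKey
  by_cases hb : toLex b ≤ toLex date <;> by_cases hc : toLex c ≤ toLex date <;>
    simp [hb, hc, Prod.Lex.toLex_lt_toLex]

theorem pvKey_injective (date : Int × Int) {a b : Int × Int}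
    (h : pvKey date a = pvKey date b) : a = b := by
  unfold pvKey at h
  have := congrArg (fun x => (ofLex x).2) h
  simpa using this

-- the B fold computes a key-minimal element of the traversed list
theorem pvFoldl_min (date : Int × Int) (l : List (Int × Int)) (a : Int × Int) :
    (l.foldl (fun best b => if pvKeyLt date b best then b else best) a = a ∨
     l.foldl (fun best b => if pvKeyLt date b best then b else best) a ∈ l) ∧
    pvKey date (l.foldl (fun best b => if pvKeyLt date b best then b else best) a) ≤ pvKey date a ∧
    (∀ y ∈ l, pvKey date (l.foldl (fun best b => if pvKeyLt date b best then b else best) a) ≤ pvKey date y) := by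
  induction l generalizing a with
  | nil => simp
  | cons x t ih =>
    simp only [List.foldl_cons]
    by_cases h : pvKeyLt date x a = true
    · rw [if_pos h]
      have hx : pvKey date x < pvKey date a := (pvKeyLt_iff date x a).mp h
      obtain ⟨hm, hle, hall⟩ := ih x
      refine ⟨?_, le_trans hle (le_of_lt hx), ?_⟩
      · rcases hm with hm | hm
        · right; simp [hm]
        · right; exact List.mem_cons_of_mem _ hm
      · intro y hy
        rcases List.mem_cons.mp hy with rfl | hy
        · exact hle
        · exact hall y hy
    · rw [if_neg h]
      have hx : ¬ pvKey date x < pvKey date a := fun hc => h ((pvKeyLt_iff date x a).mpr hc)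
      obtain ⟨hm, hle, hall⟩ := ih a
      refine ⟨?_, hle, ?_⟩
      · rcases hm with hm | hm
        · left; exact hm
        · right; exact List.mem_cons_of_mem _ hm
      · intro y hy
        rcases List.mem_cons.mp hy with rfl | hy
        · exact le_trans hle (not_lt.mp hx)
        · exact hall y hy

-- the A loop: the first element of a lex-sorted list that is > date
theorem pvFindGt_some (date : Int × Int) (s : List (Int × Int)) (m : Int × Int)
    (hp : s.Pairwise (fun a b => toLex a ≤ toLex b))
    (h : pvFindGt date s = some m) :
    m ∈ s ∧ toLex date < toLex m ∧ ∀ y ∈ s, toLex date < toLex y → toLex m ≤ toLex y := by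
  induction s with
  | nil => simp [pvFindGt] at h
  | cons x t ih =>
    rw [pvFindGt] at h
    rcases List.pairwise_cons.mp hp with ⟨hx, ht⟩
    by_cases hgt : toLex date < toLex x
    · simp only [if_pos hgt, Option.some.injEq] at h
      subst h
      refine ⟨List.mem_cons_self, hgt, ?_⟩
      intro y hy _
      rcases List.mem_cons.mp hy with rfl | hy
      · exact le_refl _
      · exact hx y hy
    · simp only [if_neg hgt] at h
      obtain ⟨hm, hdm, hall⟩ := ih ht h
      refine ⟨List.mem_cons_of_mem _ hm, hdm, ?_⟩
      intro y hy hdy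
      rcases List.mem_cons.mp hy with rfl | hy
      · exact absurd hdy hgt
      · exact hall y hy hdy

theorem pvFindGt_none (date : Int × Int) (s : List (Int × Int))
    (h : pvFindGt date s = none) : ∀ y ∈ s, ¬ toLex date < toLex y := by
  induction s with
  | nil => simp
  | cons x t ih =>
    rw [pvFindGt] at h
    by_cases hgt : toLex date < toLex x
    · simp [if_pos hgt] at h
    · simp only [if_neg hgt] at h
      intro y hy
      rcases List.mem_cons.mp hy with rfl | hy
      · exact hgt
      · exact ih h y hy

theorem pvKeys_dictOf (l : List (Int × Int × String)) :
    (pvDictOf l).keys = PySem.Set.ofList (l.map (fun p => (p.1, p.2.1))) := by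
  unfold pvDictOf
  rw [PySem.Dict.keys_foldl_insert_key l (fun p => (p.1, p.2.1)) (fun _ x => x.2.2) PySem.Dict.empty]
  exact PySem.Set.update_nil_left _

theorem pvKeys_ne_nil (l : List (Int × Int × String)) (h : l ≠ []) :
    (pvDictOf l).keys ≠ [] := by
  rw [pvKeys_dictOf]
  rcases l with _ | ⟨p, t⟩
  · exact absurd rfl h
  · intro hnil
    have : (p.1, p.2.1) ∈ PySem.Set.ofList (((p :: t).map (fun q => (q.1, q.2.1)))) := by
      rw [PySem.Set.mem_ofList]; simp
    rw [hnil] at this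
    simp at this

-- both selections are key-minimal members of d.keys, hence equal
theorem pvSelect_eq (date : Int × Int) (keys : List (Int × Int)) (hne : keys ≠ []) :
    (match pvFindGt date (PySem.List.sorted keys (fun b => toLex b) false) with
     | some bday => bday
     | none => PySem.List.pyGetD (PySem.List.sorted keys (fun b => toLex b) false) 0 ((0 : Int), (0 : Int)))
    = keys.foldl (fun best b => if pvKeyLt date b best then b else best)
        (PySem.List.pyGetD keys 0 ((0 : Int), (0 : Int))) := by
  obtain ⟨k0, t0, rfl⟩ : ∃ k0 t0, keys = k0 :: t0 := by
    rcases keys with _ | ⟨k0, t0⟩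
    · exact absurd rfl hne
    · exact ⟨k0, t0, rfl⟩
  set keys := k0 :: t0 with hkeys
  -- B side
  have hinit : PySem.List.pyGetD keys 0 ((0 : Int), (0 : Int)) = k0 := by
    rw [hkeys]; exact PySem.List.pyGetD_zero_cons _ _ _
  set rB := keys.foldl (fun best b => if pvKeyLt date b best then b else best)
      (PySem.List.pyGetD keys 0 ((0 : Int), (0 : Int))) with hrB
  obtain ⟨hBmem0, _, hBmin⟩ := pvFoldl_min date keys (PySem.List.pyGetD keys 0 ((0 : Int), (0 : Int)))
  have hBmem : rB ∈ keys := by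
    rcases hBmem0 with hB | hB
    · rw [hrB, hB, hinit]; exact List.mem_cons_self
    · exact hB
  -- A side
  set s := PySem.List.sorted keys (fun b => toLex b) false with hs
  have hsne : s ≠ [] := by
    rw [hs, Ne, PySem.List.sorted_eq_nil_iff]; exact hne
  have hp : s.Pairwise (fun a b => toLex a ≤ toLex b) :=
    PySem.List.sorted_pairwise keys (fun b => toLex b)
  have key_step : ∀ rA : Int × Int, rA ∈ keys → (∀ y ∈ keys, pvKey date rA ≤ pvKey date y) → rA = rB := by
    intro rA hAmem hAmin
    have h1 : pvKey date rA ≤ pvKey date rB := hAmin rB hBmem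
    have h2 : pvKey date rB ≤ pvKey date rA := hBmin rA hAmem
    exact pvKey_injective date (le_antisymm h1 h2)
  cases hfind : pvFindGt date s with
  | some m =>
    obtain ⟨hm, hdm, hall⟩ := pvFindGt_some date s m hp hfind
    refine key_step m ((PySem.List.mem_sorted keys _ false m).mp hm) ?_
    intro y hy
    unfold pvKey
    have hrm : ¬ toLex m ≤ toLex date := not_le.mpr hdm
    by_cases hry : toLex y ≤ toLex date
    · rw [if_neg hrm, if_pos hry]
      rw [Prod.Lex.toLex_le_toLex]; left; omega
    · rw [if_neg hrm, if_neg hry]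
      rw [Prod.Lex.toLex_le_toLex]; right
      exact ⟨rfl, hall y ((PySem.List.mem_sorted keys _ false y).mpr hy) (not_le.mp hry)⟩
  | none =>
    have hnone := pvFindGt_none date s hfind
    obtain ⟨m, tm, hsm⟩ : ∃ m tm, s = m :: tm := by
      rcases s with _ | ⟨m, tm⟩
      · exact absurd rfl hsne
      · exact ⟨m, tm, rfl⟩
    have hhead : ∀ y ∈ keys, toLex m ≤ toLex y := by
      intro y hy
      exact PySem.List.key_head_sorted_le keys (fun b => toLex b) (hs ▸ hsm) y hy
    have hms : m ∈ PySem.List.sorted keys (fun b => toLex b) false := by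
      rw [← hs, hsm]; exact List.mem_cons_self
    have hmk : m ∈ keys := (PySem.List.mem_sorted keys (fun b => toLex b) false m).mp hms
    have hget : PySem.List.pyGetD s 0 ((0 : Int), (0 : Int)) = m := by
      rw [hsm]; exact PySem.List.pyGetD_zero_cons _ _ _
    rw [hget]
    refine key_step m hmk ?_
    intro y hy
    unfold pvKey
    have hrm : toLex m ≤ toLex date :=
      not_lt.mp (hnone m (by rw [hsm]; exact List.mem_cons_self))
    have hry : toLex y ≤ toLex date :=
      not_lt.mp (hnone y ((PySem.List.mem_sorted keys _ false y).mpr hy))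
    rw [if_pos hrm, if_pos hry, Prod.Lex.toLex_le_toLex]
    right; exact ⟨rfl, hhead y hy⟩

-- ===== VERDICT (by name: the statement is the Claim_ definition above) =====
theorem next_birthday_spec : Claim_equal_next_birthday := by
  intro date birthdays _ hpre
  unfold Spec_next_birthday next_birthday next_birthday_alt
  have hne : (pvDictOf birthdays).keys ≠ [] := pvKeys_ne_nil birthdays hpre
  have hsel := pvSelect_eq date (pvDictOf birthdays).keys hne
  cases hfind : pvFindGt date
      (PySem.List.sorted (pvDictOf birthdays).keys (fun b => toLex b) false) with
  | some m =>
    rw [hfind] at hsel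
    simp only [hfind]
    rw [← hsel]
  | none =>
    rw [hfind] at hsel
    simp only [hfind]
    rw [← hsel]
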